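-- pv_equiv track=rewrite | github.com/KrisNguyen135/Project-Euler | problems/p118/main.py | get_pan_primes
-- ===== SOURCE A (Python) =====
-- from math import sqrt
--
-- def is_pan(string):
--     for digit in string:
--         if digit == '0': return False
--         if string.count(digit) > 1: return False
--     return True
--
-- def get_pan_primes(limit):
--     sieve = [True] * limit
--     new_limit = int(sqrt(limit)) + 1
--     for i in range(2, new_limit):
--         if sieve[i]:
--             for j in range(i * 2, limit, i):
--                 sieve[j] = False
--     return [i for i in range(2, limit) if sieve[i] and is_pan(str(i))]
-- ===== SOURCE B (Python) =====
-- def _is_prime(n):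
--     d = 2
--     while d * d <= n:
--         if n % d == 0:
--             return False
--         d += 1
--     return True
--
-- def get_pan_primes(limit):
--     res = []
--     for n in range(2, limit):
--         s = str(n)
--         if '0' not in s and len(set(s)) == len(s) and _is_prime(n):
--             res.append(n)
--     return res
-- ===== Notes on version B (the rewrite author's own statement) =====
-- stated objective: alternative
-- what changed: Replaces the Sieve-of-Eratosthenes array plus per-character string.count scans with a single ascending pass doing trial-division primality and a set-based distinct-nonzero-digit check.
import Mathlib
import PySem

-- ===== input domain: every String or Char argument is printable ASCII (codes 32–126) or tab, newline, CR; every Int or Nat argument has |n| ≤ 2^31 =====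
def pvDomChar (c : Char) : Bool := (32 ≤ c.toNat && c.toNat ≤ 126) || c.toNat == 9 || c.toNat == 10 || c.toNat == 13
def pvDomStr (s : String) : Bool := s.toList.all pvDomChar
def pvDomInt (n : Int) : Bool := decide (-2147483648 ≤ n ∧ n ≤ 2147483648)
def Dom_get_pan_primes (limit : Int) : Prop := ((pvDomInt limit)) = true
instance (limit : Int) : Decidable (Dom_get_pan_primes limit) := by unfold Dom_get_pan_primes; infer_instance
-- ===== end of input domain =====

-- B replaces A's sieve array plus per-character string.count scans by one ascending pass with
-- trial-division primality and a set-based distinct-nonzero-digit test (alternative, not faster).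

-- ===== PORT A =====
-- is_pan ported on the character list of the string; a 1-char string.count is List.count on the chars (exact).
def isPanAux (full : List Char) : List Char → Bool
  | [] => true
  | c :: rest => if c = '0' then false else if 1 < full.count c then false else isPanAux full rest

def is_pan (s : List Char) : Bool := isPanAux s s

-- the sieve after the outer loop has run for i in range(2, b)
def sieveAfter (limit : Int) (b : Int) : List Bool :=
  (PySem.List.pyRange 2 b 1).foldl
    (fun sv i =>
      if sv.getD i.toNat false then
        (PySem.List.pyRange (i * 2) limit i).foldl (fun sv' j => sv'.set j.toNat false) sv
      else sv)
    (List.replicate limit.toNat true)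

def get_pan_primes (limit : Int) : List Int :=
  -- int(sqrt(limit)) ported as Nat.sqrt: exact for 0 ≤ limit ≤ 2^31 (checked: float sqrt never crosses an integer there)
  let sieve := sieveAfter limit ((Nat.sqrt limit.toNat : Int) + 1)
  -- sieve[i] with 2 ≤ i < limit = len(sieve) is always in range, so getD is exact
  (PySem.List.pyRange 2 limit 1).filter
    (fun i => sieve.getD i.toNat false && is_pan (PySem.Int.toChars i))

-- ===== PORT B =====
-- while d * d <= n: … ; the '2 ≤ d' conjunct only makes the recursion total (every call has d ≥ 2)
def trialDiv (n d : Int) : Bool :=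
  if h : 2 ≤ d ∧ d * d ≤ n then
    if PySem.Int.mod n d = 0 then false else trialDiv n (d + 1)
  else true
termination_by (n + 1 - d).toNat
decreasing_by
  have hd : d * 1 ≤ d * d := by nlinarith [h.1]
  omega

-- '0' not in s and len(set(s)) == len(s)
def panCheck (s : List Char) : Bool :=
  !s.contains '0' && ((PySem.Set.ofList s).length == s.length)

def get_pan_primes_alt (limit : Int) : List Int :=
  (PySem.List.pyRange 2 limit 1).foldl
    (fun acc n =>
      if panCheck (PySem.Int.toChars n) && trialDiv n 2 then acc ++ [n] else acc) []

-- ===== PRECONDITION & SPEC =====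
-- Pre_ excludes only negative limits, where Python A raises ValueError (math.sqrt of a negative number).
def Pre_get_pan_primes (limit : Int) : Prop := 0 ≤ limit
instance (limit : Int) : Decidable (Pre_get_pan_primes limit) := by unfold Pre_get_pan_primes; infer_instance
def pvWitness_get_pan_primes : Int := 50

def Spec_get_pan_primes (limit : Int) (out : List Int) : Prop := out = get_pan_primes_alt limit
instance (limit : Int) (out : List Int) : Decidable (Spec_get_pan_primes limit out) := by unfold Spec_get_pan_primes; infer_instance

-- ===== CLAIM (what is proved, stated in full; the proofs are below) =====
def Claim_equal_get_pan_primes : Prop := ∀ (limit : Int), Dom_get_pan_primes limit → Pre_get_pan_primes limit → Spec_get_pan_primes limit (get_pan_primes limit)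

-- ===== LEMMAS AND PROOFS =====

-- ---- pandigital check: A's per-char count scan = B's nodup-and-no-zero test ----
lemma isPanAux_eq_true (full : List Char) (rest : List Char) :
    isPanAux full rest = true ↔ ∀ c ∈ rest, c ≠ '0' ∧ full.count c ≤ 1 := by
  induction rest with
  | nil => simp [isPanAux]
  | cons c t ih =>
    simp only [isPanAux, List.mem_cons]
    split_ifs with h1 h2
    · simp [h1]
    · constructor
      · intro h; cases h
      · intro h; exact absurd (h c (Or.inl rfl)).2 (by omega)
    · rw [ih]
      constructor
      · intro h; rintro x (rfl | hx)
        · exact ⟨h1, by omega⟩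
        · exact h x hx
      · intro h x hx; exact h x (Or.inr hx)

lemma ofList_length_eq_iff (s : List Char) :
    ((PySem.Set.ofList s).length = s.length) ↔ s.Nodup := by
  constructor
  · intro h
    have hperm : (PySem.Set.ofList s).Perm s.dedup := by
      rw [List.perm_ext_iff_of_nodup (PySem.Set.nodup_ofList s) (List.nodup_dedup s)]
      intro a; rw [PySem.Set.mem_ofList, List.mem_dedup]
    have hlen : s.dedup.length = s.length := by
      rw [← hperm.length_eq, h]
    have := (List.dedup_sublist s).eq_of_length hlen
    rw [← List.dedup_eq_self]; exact this
  · intro h; rw [PySem.Set.ofList_eq_self_of_nodup s h]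

lemma is_pan_eq_panCheck (s : List Char) : is_pan s = panCheck s := by
  unfold is_pan panCheck
  by_cases h : isPanAux s s = true
  · rw [h]
    have hall := (isPanAux_eq_true s s).mp h
    have hz : s.contains '0' = false := by
      rw [Bool.eq_false_iff]
      intro hc
      exact (hall '0' (List.contains_iff_mem.mp hc)).1 rfl
    have hnd : s.Nodup := List.nodup_iff_count_le_one.mpr (by
      intro a
      by_cases ha : a ∈ s
      · exact (hall a ha).2
      · simp [List.count_eq_zero_of_not_mem ha])
    rw [hz, (beq_iff_eq).mpr ((ofList_length_eq_iff s).mpr hnd)]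
    rfl
  · rw [Bool.eq_false_iff.mpr h]
    rw [isPanAux_eq_true] at h
    push_neg at h
    obtain ⟨c, hc, hbad⟩ := h
    by_cases hz : c = '0'
    · subst hz
      rw [List.contains_iff_mem.mpr hc]
      rfl
    · have hcnt : 1 < s.count c := by
        rcases Nat.lt_or_ge 1 (s.count c) with h' | h'
        · exact h'
        · exact absurd (hbad hz) (by omega)
      have hnn : ¬ s.Nodup := by
        rw [List.nodup_iff_count_le_one]; push_neg; exact ⟨c, hcnt⟩
      rw [← ofList_length_eq_iff] at hnn
      have hb : ((PySem.Set.ofList s).length == s.length) = false := by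
        simpa using hnn
      rw [hb, Bool.and_false]

-- ---- trial division = primality ----
lemma trialDiv_eq_true_iff (n : Int) : ∀ (d : Int), 2 ≤ d →
    (trialDiv n d = true ↔ ∀ e : Int, d ≤ e → e * e ≤ n → ¬ e ∣ n) := by
  intro d hd
  induction d using trialDiv.induct n with
  | case1 d h hmod =>
    rw [trialDiv, dif_pos h, if_pos hmod]
    simp only [Bool.false_eq_true, false_iff]
    push_neg
    exact ⟨d, le_refl d, h.2, (PySem.Int.mod_eq_zero_iff_dvd n d).mp hmod⟩
  | case2 d h hmod ih =>
    rw [trialDiv, dif_pos h, if_neg hmod]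
    rw [ih (by omega)]
    constructor
    · intro hall e he hee
      rcases eq_or_lt_of_le he with rfl | hlt
      · rw [← PySem.Int.mod_eq_zero_iff_dvd]; exact hmod
      · exact hall e (by omega) hee
    · intro hall e he hee; exact hall e (by omega) hee
  | case3 d h =>
    rw [trialDiv, dif_neg h]
    simp only [show (true = true) ↔ True by simp, true_iff]
    intro e he hee hdvd
    have hnn : ¬ d * d ≤ n := by
      intro hc; exact h ⟨hd, hc⟩
    have : d * d ≤ e * e := by nlinarith
    omega

lemma trialDiv_prime (m : Nat) (hm : 2 ≤ m) :
    trialDiv (m : Int) 2 = decide (Nat.Prime m) := by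
  by_cases hp : Nat.Prime m
  · simp only [hp, decide_true]
    rw [trialDiv_eq_true_iff (m : Int) 2 (by omega)]
    intro e he hee hdvd
    have he0 : 0 ≤ e := by omega
    obtain ⟨k, rfl⟩ := Int.eq_ofNat_of_zero_le he0
    have hkm : k ∣ m := Int.natCast_dvd_natCast.mp hdvd
    have h2k : 2 ≤ k := by exact_mod_cast he
    have hkk : k * k ≤ m := by exact_mod_cast hee
    rcases (Nat.Prime.eq_one_or_self_of_dvd hp k hkm) with h1 | h1
    · omega
    · subst h1; nlinarith
  · simp only [hp, decide_false]
    rw [Bool.eq_false_iff, ne_eq, trialDiv_eq_true_iff (m : Int) 2 (by omega)]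
    push_neg
    have hpf := Nat.minFac_prime (show m ≠ 1 by omega)
    have hsq : m.minFac ^ 2 ≤ m := Nat.minFac_sq_le_self (by omega) hp
    refine ⟨(m.minFac : Int), by exact_mod_cast hpf.two_le, ?_, ?_⟩
    · push_cast; nlinarith
    · exact Int.natCast_dvd_natCast.mpr (Nat.minFac_dvd m)

-- ---- sieve correctness ----
lemma getD_set_false (sv : List Bool) (k m : Nat) :
    (sv.set k false).getD m false = (!(decide (m = k)) && sv.getD m false) := by
  by_cases h : m = k
  · subst h
    by_cases hk : m < sv.length
    · simp [List.getD_eq_getElem?_getD, List.getElem?_set, hk]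
    · have h1 : sv[m]? = none := List.getElem?_eq_none (by omega)
      simp [List.getD_eq_getElem?_getD, List.getElem?_set, hk, h1]
  · simp [List.getD_eq_getElem?_getD, List.getElem?_set, Ne.symm h, h]

lemma foldl_set_false (L : List Int) (sv : List Bool) (m : Nat) (hL : ∀ j ∈ L, 0 ≤ j) :
    (L.foldl (fun sv' j => sv'.set j.toNat false) sv).getD m false
      = (!(decide ((m : Int) ∈ L)) && sv.getD m false) := by
  induction L generalizing sv with
  | nil => simp
  | cons j t ih =>
    simp only [List.foldl_cons]
    rw [ih _ (fun x hx => hL x (List.mem_cons_of_mem j hx)), getD_set_false]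
    have hj0 : 0 ≤ j := hL j (List.mem_cons_self ..)
    have hje : (m = j.toNat) ↔ ((m : Int) = j) := by omega
    have hiff : ((m : Int) ∈ j :: t) ↔ (m = j.toNat ∨ (m : Int) ∈ t) := by
      rw [List.mem_cons, hje]
    simp only [hiff, Bool.decide_or, Bool.not_or]
    cases hA : decide (m = j.toNat) <;> cases hB : decide ((m : Int) ∈ t) <;> simp [hA, hB]

-- marked predicate: m has been crossed out after the outer loop processed 2..t-1
def Marked (t m : Nat) : Prop := ∃ p : Nat, 2 ≤ p ∧ p < t ∧ Nat.Prime p ∧ p ∣ m ∧ 2 * p ≤ m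

lemma marked_succ_iff (t m : Nat) :
    Marked (t + 1) m ↔ (Marked t m ∨ (Nat.Prime t ∧ t ∣ m ∧ 2 * t ≤ m)) := by
  constructor
  · rintro ⟨p, h2, hlt, hp, hd, hle⟩
    rcases Nat.lt_succ_iff_lt_or_eq.mp hlt with h | rfl
    · exact Or.inl ⟨p, h2, h, hp, hd, hle⟩
    · exact Or.inr ⟨hp, hd, hle⟩
  · rintro (⟨p, h2, hlt, hp, hd, hle⟩ | ⟨hp, hd, hle⟩)
    · exact ⟨p, h2, by omega, hp, hd, hle⟩
    · exact ⟨t, hp.two_le, by omega, hp, hd, hle⟩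

lemma not_marked_iff_prime (t : Nat) (ht : 2 ≤ t) : ¬ Marked t t ↔ Nat.Prime t := by
  constructor
  · intro h
    by_contra hp
    apply h
    have hpf := Nat.minFac_prime (show t ≠ 1 by omega)
    have hdvd := Nat.minFac_dvd t
    have hne : t.minFac ≠ t := by
      intro he
      exact hp (Nat.prime_def_minFac.mpr ⟨ht, he⟩)
    have hlt : t.minFac < t := lt_of_le_of_ne (Nat.le_of_dvd (by omega) hdvd) hne
    obtain ⟨c, hc⟩ := hdvd
    have hc2 : 2 ≤ c := by
      rcases Nat.lt_or_ge c 2 with h' | h'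
      · interval_cases c <;> omega
      · exact h'
    exact ⟨t.minFac, hpf.two_le, hlt, hpf, ⟨c, hc⟩, by nlinarith⟩
  · rintro hp ⟨p, h2, hlt, hpp, hd, hle⟩
    rcases hp.eq_one_or_self_of_dvd p hd with h | h <;> omega

lemma sieve_inv (limit : Int) (h0 : 0 ≤ limit) :
    ∀ t : Nat, 2 ≤ t → t ≤ Nat.sqrt limit.toNat + 1 →
    ∀ m : Nat, m < limit.toNat →
    ((sieveAfter limit (t : Int)).getD m false = true ↔ ¬ Marked t m) := by
  intro t ht
  induction t, ht using Nat.le_induction with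
  | base =>
    intro _ m hm
    unfold sieveAfter
    rw [show ((2 : Nat) : Int) = 2 by rfl, PySem.List.pyRange_one_eq_nil (by omega)]
    simp only [List.foldl_nil]
    have hget : (List.replicate limit.toNat true).getD m false = true := by
      rw [List.getD_eq_getElem _ _ (by simpa using hm)]
      simp
    rw [hget]
    simp only [true_iff]
    rintro ⟨p, h2, hlt, _⟩
    omega
  | succ t ht ih =>
    intro hK m hm
    have hK' : t ≤ Nat.sqrt limit.toNat := by omega
    have htn : t < limit.toNat := by
      have : t * t ≤ limit.toNat := Nat.le_sqrt.mp hK'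
      nlinarith
    have hrange : PySem.List.pyRange 2 ((t : Nat) + 1 : Int) 1
        = PySem.List.pyRange 2 (t : Int) 1 ++ [(t : Int)] := by
      exact PySem.List.pyRange_one_succ_right (by exact_mod_cast ht)
    have hstep : sieveAfter limit (((t + 1 : Nat)) : Int)
        = (if (sieveAfter limit (t : Int)).getD ((t : Int)).toNat false then
            (PySem.List.pyRange ((t : Int) * 2) limit (t : Int)).foldl
              (fun sv' j => sv'.set j.toNat false) (sieveAfter limit (t : Int))
          else sieveAfter limit (t : Int)) := by
      unfold sieveAfter
      rw [show (((t + 1 : Nat)) : Int) = (t : Int) + 1 by push_cast; ring, hrange,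
        List.foldl_append]
      rfl
    have hguard : ((sieveAfter limit (t : Int)).getD ((t : Int)).toNat false = true)
        ↔ Nat.Prime t := by
      rw [Int.toNat_natCast]
      exact (ih (by omega) t htn).trans (not_marked_iff_prime t ht)
    by_cases hp : Nat.Prime t
    · rw [hstep, if_pos (hguard.mpr hp)]
      have hmem : ∀ j ∈ PySem.List.pyRange ((t : Int) * 2) limit (t : Int), 0 ≤ j := by
        intro j hj
        have := (PySem.List.mem_pyRange_iff_of_pos
          (by exact_mod_cast (by omega : 0 < t)) j).mp hj
        omega
      rw [foldl_set_false _ _ _ hmem]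
      have hmm : ((m : Int) ∈ PySem.List.pyRange ((t : Int) * 2) limit (t : Int))
          ↔ (t ∣ m ∧ 2 * t ≤ m) := by
        rw [PySem.List.mem_pyRange_iff_of_pos (by exact_mod_cast (by omega : 0 < t))]
        constructor
        · rintro ⟨ha, hb, hc⟩
          have h4 : (t : Int) ∣ (m : Int) := by
            have := dvd_add hc (dvd_mul_right (t : Int) 2)
            simpa using this
          exact ⟨Int.natCast_dvd_natCast.mp h4, by omega⟩
        · rintro ⟨ha, hb⟩
          refine ⟨by omega, by omega, ?_⟩
          exact dvd_sub (Int.natCast_dvd_natCast.mpr ha) (dvd_mul_right (t : Int) 2)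
      have hiff : Marked (t + 1) m ↔ ((t ∣ m ∧ 2 * t ≤ m) ∨ Marked t m) := by
        rw [marked_succ_iff]; tauto
      rw [Bool.and_eq_true, Bool.not_eq_true', decide_eq_false_iff_not, hmm,
        ih (by omega) m hm, hiff]
      tauto
    · rw [hstep, if_neg (fun hg => hp (hguard.mp hg)), ih (by omega) m hm]
      have hss : Marked (t + 1) m ↔ Marked t m := by
        rw [marked_succ_iff]
        constructor
        · rintro (h | ⟨h, _⟩)
          · exact h
          · exact absurd h hp
        · exact Or.inl
      rw [hss]

lemma sieve_final (limit : Int) (h0 : 0 ≤ limit) (m : Nat) (h2 : 2 ≤ m)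
    (hm : m < limit.toNat) :
    (sieveAfter limit ((Nat.sqrt limit.toNat : Int) + 1)).getD m false
      = decide (Nat.Prime m) := by
  have hKn : (2 : Nat) ≤ Nat.sqrt limit.toNat + 1 := by
    have : 1 ≤ Nat.sqrt limit.toNat := Nat.le_sqrt.mpr (by omega)
    omega
  have hcast : ((Nat.sqrt limit.toNat : Int) + 1) = (((Nat.sqrt limit.toNat + 1 : Nat)) : Int) := by
    push_cast; ring
  rw [hcast]
  have h := sieve_inv limit h0 _ hKn (le_refl _) m hm
  by_cases hp : Nat.Prime m
  · have hnm : ¬ Marked (Nat.sqrt limit.toNat + 1) m := by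
      rintro ⟨p, hp2, hplt, hpp, hpd, hple⟩
      rcases hp.eq_one_or_self_of_dvd p hpd with h' | h' <;> omega
    rw [h.mpr hnm]
    simp [hp]
  · have hpf := Nat.minFac_prime (show m ≠ 1 by omega)
    have hsq : m.minFac ^ 2 ≤ m := Nat.minFac_sq_le_self (by omega) hp
    have hplt : m.minFac < Nat.sqrt limit.toNat + 1 := by
      have : m.minFac ≤ Nat.sqrt limit.toNat :=
        Nat.le_sqrt.mpr (by nlinarith)
      omega
    have hmk : Marked (Nat.sqrt limit.toNat + 1) m :=
      ⟨m.minFac, hpf.two_le, hplt, hpf, Nat.minFac_dvd m, by nlinarith [hpf.two_le]⟩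
    have hb : (sieveAfter limit (((Nat.sqrt limit.toNat + 1 : Nat)) : Int)).getD m false = false :=
      Bool.eq_false_iff.mpr (fun hg => (h.mp hg) hmk)
    rw [hb]
    simp [hp]

-- ---- main equivalence ----
lemma main_eq (limit : Int) (h0 : 0 ≤ limit) :
    get_pan_primes limit = get_pan_primes_alt limit := by
  unfold get_pan_primes get_pan_primes_alt
  rw [PySem.List.foldl_append_if_eq_filter
    (fun n => panCheck (PySem.Int.toChars n) && trialDiv n 2), List.nil_append]
  apply List.filter_congr
  intro i hi
  have hmem := (PySem.List.mem_pyRange_one (a := 2) (b := limit)).mp (by simpa using hi)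
  have hi0 : 0 ≤ i := by omega
  obtain ⟨m, rfl⟩ := Int.eq_ofNat_of_zero_le hi0
  have hm2 : 2 ≤ m := by exact_mod_cast hmem.1
  have hmn : m < limit.toNat := by omega
  rw [Int.toNat_natCast, sieve_final limit h0 m hm2 hmn, trialDiv_prime m hm2,
    is_pan_eq_panCheck, Bool.and_comm]

-- ===== VERDICT (by name: the statement is the Claim_ definition above) =====
theorem get_pan_primes_spec : Claim_equal_get_pan_primes := by
  intro limit _ hpre
  unfold Spec_get_pan_primes
  exact main_eq limit hpre
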